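-- pv_equiv track=rewrite | github.com/arnm/accipiokey | accipiokey/apputils.py | find_second_to_last
-- ===== SOURCE A (Python) =====
-- def find_second_to_last(haystack, needle):
--     found = []
--     for i, e in enumerate(haystack):
--         if e == needle:
--             found.append(i)
--
--     if len(found) >= 2:
--         return found[-2]
--     else:
--         return None
-- ===== SOURCE B (Python) =====
-- def find_second_to_last(haystack, needle):
--     last = None
--     second_last = None
--     for i, e in enumerate(haystack):
--         if e == needle:
--             second_last = last
--             last = i
--     return second_last
-- ===== Notes on version B (the rewrite author's own statement) =====
-- stated objective: simpler
-- what changed: Instead of accumulating a list of all match indices and indexing it at -2, B keeps only the last two match indices in two variables during a single pass, using O(1) extra space.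
import Mathlib
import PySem

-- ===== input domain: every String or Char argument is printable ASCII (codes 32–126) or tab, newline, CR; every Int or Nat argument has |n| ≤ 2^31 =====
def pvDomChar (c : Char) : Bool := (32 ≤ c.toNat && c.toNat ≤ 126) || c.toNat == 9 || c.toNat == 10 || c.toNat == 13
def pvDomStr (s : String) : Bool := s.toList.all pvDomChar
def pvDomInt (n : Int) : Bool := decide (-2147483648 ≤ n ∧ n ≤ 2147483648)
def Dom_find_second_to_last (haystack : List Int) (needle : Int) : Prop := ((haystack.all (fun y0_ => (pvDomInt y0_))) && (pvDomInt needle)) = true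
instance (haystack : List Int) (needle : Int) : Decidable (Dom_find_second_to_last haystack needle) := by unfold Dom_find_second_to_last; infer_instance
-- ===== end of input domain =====

-- ===== PORT A =====
-- A: collect all match indices into a list, then return found[-2] if len(found) >= 2 else None.
def find_second_to_last (haystack : List Int) (needle : Int) : Option Int :=
  let found : List Int :=
    (PySem.List.enumerate haystack).foldl
      (fun acc p => if p.2 == needle then acc ++ [p.1] else acc) []
  if 2 ≤ found.length then PySem.List.pyGet? found (-2) else none

-- ===== PORT B =====
-- B: one pass keeping only the last and second-to-last match indices.
def find_second_to_last_alt (haystack : List Int) (needle : Int) : Option Int :=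
  ((PySem.List.enumerate haystack).foldl
      (fun (s : Option Int × Option Int) p =>
        if p.2 == needle then (some p.1, s.1) else s) (none, none)).2

-- ===== PRECONDITION & SPEC =====
def Spec_find_second_to_last (haystack : List Int) (needle : Int) (out : Option Int) : Prop := out = find_second_to_last_alt haystack needle
instance (haystack : List Int) (needle : Int) (out : Option Int) : Decidable (Spec_find_second_to_last haystack needle out) := by unfold Spec_find_second_to_last; infer_instance

-- ===== CLAIM (what is proved, stated in full; the proofs are below) =====
def Claim_equal_find_second_to_last : Prop := ∀ (haystack : List Int) (needle : Int), Dom_find_second_to_last haystack needle → Spec_find_second_to_last haystack needle (find_second_to_last haystack needle)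

-- ===== LEMMAS AND PROOFS =====

-- Loop invariant: B's pair is (last, second-to-last) of A's accumulated list.
theorem fstl_loop (needle : Int) (l : List (Int × Int)) (acc : List Int) :
    (l.foldl (fun (s : Option Int × Option Int) p =>
        if p.2 == needle then (some p.1, s.1) else s)
      (acc.getLast?, acc.dropLast.getLast?))
    = (((l.foldl (fun acc p => if p.2 == needle then acc ++ [p.1] else acc) acc)).getLast?,
       ((l.foldl (fun acc p => if p.2 == needle then acc ++ [p.1] else acc) acc)).dropLast.getLast?) := by
  induction l generalizing acc with
  | nil => simp
  | cons p l ih =>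
    simp only [List.foldl_cons]
    by_cases h : p.2 == needle
    · simp only [h, if_pos]
      have h1 : (acc ++ [p.1]).getLast? = some p.1 := by simp
      have h2 : (acc ++ [p.1]).dropLast.getLast? = acc.getLast? := by simp
      rw [← h1, ← h2]
      exact ih (acc ++ [p.1])
    · simp only [h, if_neg, Bool.false_eq_true, not_false_iff]
      exact ih acc

-- found[-2] with the length guard is exactly dropLast.getLast?.
theorem fstl_sel (found : List Int) :
    (if 2 ≤ found.length then PySem.List.pyGet? found (-2) else none)
      = found.dropLast.getLast? := by
  by_cases h : 2 ≤ found.length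
  · rw [if_pos h, PySem.List.pyGet?_neg_ofNat found 2 (by omega) h,
      List.getLast?_eq_getElem?, List.getElem?_dropLast, List.length_dropLast]
    have hlt : found.length - 1 - 1 < found.length - 1 := by omega
    rw [if_pos hlt]
    congr 1
  · rw [if_neg h]
    have hd : found.dropLast = [] := by
      have hlen := List.length_dropLast (xs := found)
      exact List.length_eq_zero_iff.mp (by omega)
    rw [hd]; rfl

-- ===== VERDICT (by name: the statement is the Claim_ definition above) =====
theorem find_second_to_last_spec : Claim_equal_find_second_to_last := by
  intro haystack needle _
  unfold Spec_find_second_to_last find_second_to_last find_second_to_last_alt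
  have h := fstl_loop needle (PySem.List.enumerate haystack) []
  simp only [List.getLast?_nil, List.dropLast_nil] at h
  rw [h]
  exact fstl_sel _
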